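-- pv_equiv track=rewrite | github.com/ReactionMechanismGenerator/ARC | arc/job/adapters/ts/linear_utils/math_zmat.py | get_r_constraints
-- ===== SOURCE A (Python) =====
-- from typing import TYPE_CHECKING, Dict, List, Optional, Set, Tuple, Union
--
-- def get_r_constraints(expected_breaking_bonds: List[Tuple[int, int]],
--                       expected_forming_bonds: List[Tuple[int, int]],
--                       ) -> Dict[str, list]:
--     """
--     Get the "R_atom" constraints for the reactant ZMat.
--
--     Atoms are sorted by their participation frequency in changing bonds (most frequent
--     first), with atom index as a deterministic tiebreaker so results are canonical
--     regardless of input ordering.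
--
--     Args:
--         expected_breaking_bonds (List[Tuple[int, int]]): Expected breaking bonds.
--         expected_forming_bonds (List[Tuple[int, int]]): Expected forming bonds.
--
--     Returns:
--         Dict[str, list]: The constraints.
--     """
--     constraints = list()
--     atom_occurrences: Dict[int, int] = dict()
--     for bond in expected_breaking_bonds + expected_forming_bonds:
--         for atom in bond:
--             atom_occurrences[atom] = atom_occurrences.get(atom, 0) + 1
--     atoms_sorted_by_frequency = [k for k, _ in sorted(atom_occurrences.items(),
--                                                        key=lambda item: (-item[1], item[0]))]
--     for i, atom in enumerate(atoms_sorted_by_frequency):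
--         for bond in expected_breaking_bonds + expected_forming_bonds:
--             if atom in bond and all(a not in atoms_sorted_by_frequency[:i] for a in bond):
--                 constraints.append(bond if atom == bond[0] else (bond[1], bond[0]))
--                 break
--     return {'R_atom': constraints}
-- ===== SOURCE B (Python) =====
-- def get_r_constraints(expected_breaking_bonds, expected_forming_bonds):
--     bonds = expected_breaking_bonds + expected_forming_bonds
--     occ = {}
--     for a, b in bonds:
--         occ[a] = occ.get(a, 0) + 1
--         occ[b] = occ.get(b, 0) + 1
--     order = [k for k, _ in sorted(occ.items(), key=lambda item: (-item[1], item[0]))]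
--     rank = {atom: i for i, atom in enumerate(order)}
--     owner_bond = {}
--     for a, b in bonds:
--         owner = a if rank[a] <= rank[b] else b
--         if owner not in owner_bond:
--             owner_bond[owner] = (a, b) if owner == a else (b, a)
--     return {'R_atom': [owner_bond[atom] for atom in order if atom in owner_bond]}
-- ===== Notes on version B (the rewrite author's own statement) =====
-- stated objective: faster
-- what changed: Replaces the per-atom rescan of all bonds with its prefix-membership test by one rank dict and a single pass assigning each bond to its smaller-rank endpoint, then an ordered emit.
import Mathlib
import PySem

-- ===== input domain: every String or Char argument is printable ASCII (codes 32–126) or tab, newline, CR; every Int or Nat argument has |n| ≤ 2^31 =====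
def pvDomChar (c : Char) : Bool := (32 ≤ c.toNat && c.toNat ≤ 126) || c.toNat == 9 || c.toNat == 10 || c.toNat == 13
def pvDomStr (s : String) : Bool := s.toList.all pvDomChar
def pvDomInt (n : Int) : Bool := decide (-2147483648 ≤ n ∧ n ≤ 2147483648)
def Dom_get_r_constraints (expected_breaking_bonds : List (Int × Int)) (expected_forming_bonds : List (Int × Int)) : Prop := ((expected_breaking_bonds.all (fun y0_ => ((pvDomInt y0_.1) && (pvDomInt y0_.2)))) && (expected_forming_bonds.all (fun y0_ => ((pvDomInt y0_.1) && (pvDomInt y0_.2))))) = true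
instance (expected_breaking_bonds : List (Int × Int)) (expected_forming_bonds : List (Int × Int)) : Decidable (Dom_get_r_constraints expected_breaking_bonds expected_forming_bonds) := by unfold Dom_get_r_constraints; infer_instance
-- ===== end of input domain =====

-- B replaces A's per-atom rescan of every bond (with its prefix-membership test) by one rank
-- index plus a single owner-assignment pass over the bonds, then an ordered emit.

-- ===== PORT A =====
-- atom_occurrences / atoms_sorted_by_frequency: IDENTICAL code in A and in Source B, shared helper
def pvAtomOrder (bonds : List (Int × Int)) : List Int :=
  let occ : PySem.Dict Int Int :=
    bonds.foldl (fun d b => (d.modify b.1 0 (· + 1)).modify b.2 0 (· + 1)) PySem.Dict.empty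
  (PySem.List.sorted2 occ.items (fun it => -it.2) (fun it => it.1)).map (·.1)

-- A's inner 'for bond in …: if atom in bond and all(a not in prefix for a in bond): append; break'
def pvPickA (bonds : List (Int × Int)) (seen : List Int) (atom : Int) : Option (Int × Int) :=
  match bonds with
  | [] => none
  | b :: rest =>
    if (atom = b.1 ∨ atom = b.2) ∧ b.1 ∉ seen ∧ b.2 ∉ seen then
      some (if atom = b.1 then b else (b.2, b.1))
    else pvPickA rest seen atom

-- A's 'for i, atom in enumerate(atoms_sorted_by_frequency)': seen is the prefix before atom
def pvLoopA (bonds : List (Int × Int)) (seen : List Int) : List Int → List (Int × Int)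
  | [] => []
  | atom :: rest =>
    match pvPickA bonds seen atom with
    | some c => c :: pvLoopA bonds (seen ++ [atom]) rest
    | none => pvLoopA bonds (seen ++ [atom]) rest

def get_r_constraints (expected_breaking_bonds : List (Int × Int)) (expected_forming_bonds : List (Int × Int)) : List (String × List (Int × Int)) :=
  let bonds := expected_breaking_bonds ++ expected_forming_bonds
  let order := pvAtomOrder bonds
  [("R_atom", pvLoopA bonds [] order)]

-- ===== PORT B =====
-- Source B's 'rank = {atom: i for i, atom in enumerate(order)}'
def pvRank (order : List Int) : PySem.Dict Int Int :=
  (PySem.List.enumerate order).foldl (fun d p => d.insert p.2 p.1) PySem.Dict.empty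

-- Source B's loop body: rank[a] never misses (every endpoint is a key), so getD 0 is exact wherever Source B returns
def pvStepB (rank : PySem.Dict Int Int) (d : PySem.Dict Int (Int × Int)) (b : Int × Int) : PySem.Dict Int (Int × Int) :=
  let owner := if rank.getD b.1 0 ≤ rank.getD b.2 0 then b.1 else b.2
  if d.contains owner then d else d.insert owner (if owner = b.1 then b else (b.2, b.1))

def pvOwnerDict (bonds : List (Int × Int)) (rank : PySem.Dict Int Int) : PySem.Dict Int (Int × Int) :=
  bonds.foldl (pvStepB rank) PySem.Dict.empty

def get_r_constraints_alt (expected_breaking_bonds : List (Int × Int)) (expected_forming_bonds : List (Int × Int)) : List (String × List (Int × Int)) :=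
  let bonds := expected_breaking_bonds ++ expected_forming_bonds
  let order := pvAtomOrder bonds
  let owner_bond := pvOwnerDict bonds (pvRank order)
  [("R_atom", order.filterMap (fun atom => owner_bond.get? atom))]

-- ===== PRECONDITION & SPEC =====
def Spec_get_r_constraints (expected_breaking_bonds : List (Int × Int)) (expected_forming_bonds : List (Int × Int)) (out : List (String × List (Int × Int))) : Prop := out = get_r_constraints_alt expected_breaking_bonds expected_forming_bonds
instance (expected_breaking_bonds : List (Int × Int)) (expected_forming_bonds : List (Int × Int)) (out : List (String × List (Int × Int))) : Decidable (Spec_get_r_constraints expected_breaking_bonds expected_forming_bonds out) := by unfold Spec_get_r_constraints; infer_instance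

-- ===== CLAIM (what is proved, stated in full; the proofs are below) =====
def Claim_equal_get_r_constraints : Prop := ∀ (expected_breaking_bonds : List (Int × Int)) (expected_forming_bonds : List (Int × Int)), Dom_get_r_constraints expected_breaking_bonds expected_forming_bonds → Spec_get_r_constraints expected_breaking_bonds expected_forming_bonds (get_r_constraints expected_breaking_bonds expected_forming_bonds)

-- ===== LEMMAS AND PROOFS =====

-- the endpoint of b that A's scan keeps for atom / that B makes the owner: smaller position in order
def pvOwnerOf (order : List Int) (b : Int × Int) : Int :=
  if order.idxOf b.1 ≤ order.idxOf b.2 then b.1 else b.2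

def pvOrient (order : List Int) (b : Int × Int) : Int × Int :=
  if pvOwnerOf order b = b.1 then b else (b.2, b.1)

theorem occ_foldl_eq (bonds : List (Int × Int)) (d : PySem.Dict Int Int) :
    bonds.foldl (fun d b => (d.modify b.1 0 (· + 1)).modify b.2 0 (· + 1)) d
      = (bonds.flatMap fun b => [b.1, b.2]).foldl (fun d x => d.modify x 0 (· + 1)) d := by
  induction bonds generalizing d with
  | nil => rfl
  | cons b rest ih => simp [List.flatMap_cons, ih]

theorem order_perm (bonds : List (Int × Int)) :
    (pvAtomOrder bonds).Perm (PySem.Set.ofList (bonds.flatMap fun b => [b.1, b.2])) := by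
  unfold pvAtomOrder
  rw [occ_foldl_eq, ← PySem.Dict.counter_eq_foldl, ← PySem.Dict.keys_counter]
  have h := (PySem.List.sorted2_perm (PySem.Dict.counter (bonds.flatMap fun b => [b.1, b.2])).items
      (fun it => -it.2) (fun it => it.1) false).map (fun p : Int × Int => p.1)
  simpa [PySem.Dict.keys] using h

theorem order_nodup (bonds : List (Int × Int)) : (pvAtomOrder bonds).Nodup :=
  (order_perm bonds).nodup_iff.mpr (PySem.Set.nodup_ofList _)

theorem mem_order (bonds : List (Int × Int)) (a : Int) :
    a ∈ pvAtomOrder bonds ↔ a ∈ bonds.flatMap fun b => [b.1, b.2] := by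
  rw [(order_perm bonds).mem_iff, PySem.Set.mem_ofList]

theorem endpoints_mem (bonds : List (Int × Int)) (b : Int × Int) (hb : b ∈ bonds) :
    b.1 ∈ pvAtomOrder bonds ∧ b.2 ∈ pvAtomOrder bonds := by
  constructor <;> · rw [mem_order]; exact List.mem_flatMap.mpr ⟨b, hb, by simp⟩

theorem rank_getD (order : List Int) (hnd : order.Nodup) (a : Int) (ha : a ∈ order) :
    (pvRank order).getD a 0 = (order.idxOf a : Int) := by
  have hitems : (pvRank order).items
      = (PySem.List.enumerate order).map (fun p => (p.2, p.1)) := by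
    have h := PySem.Dict.items_foldl_insert_fresh (PySem.List.enumerate order)
      (fun p => p.2) (fun p => p.1) (PySem.Dict.empty : PySem.Dict Int Int)
      (fun _ _ => PySem.Dict.contains_empty _)
      (by rw [PySem.List.map_snd_enumerate]; exact hnd)
    simpa [pvRank] using h
  have hkeys : (pvRank order).keys = order := by
    simp only [PySem.Dict.keys, hitems, List.map_map]
    exact PySem.List.map_snd_enumerate order 0
  have hlt : order.idxOf a < order.length := List.idxOf_lt_length_iff.mpr ha
  have hmem : (a, (order.idxOf a : Int)) ∈ (pvRank order).items := by
    rw [hitems]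
    exact List.mem_map.mpr ⟨((order.idxOf a : Int), a),
      (PySem.List.mem_enumerate_iff order 0 _).mpr ⟨order.idxOf a, hlt, by simp [List.getElem_idxOf hlt]⟩, rfl⟩
  exact PySem.Dict.getD_of_mem_items _ hmem (by rw [hkeys]; exact hnd) 0

theorem mem_take_iff_idxOf_lt (order : List Int) (hnd : order.Nodup) (a : Int) (ha : a ∈ order) (i : Nat) :
    a ∈ order.take i ↔ order.idxOf a < i := by
  have hlt : order.idxOf a < order.length := List.idxOf_lt_length_iff.mpr ha
  constructor
  · intro h
    obtain ⟨j, hj, hja⟩ := List.mem_take_iff_getElem.mp h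
    have hjl : j < order.length := lt_of_lt_of_le hj (min_le_right _ _)
    have : j = order.idxOf a := by
      have := List.getElem_idxOf (x := a) (xs := order) hlt
      exact (hnd.getElem_inj_iff (hi := hjl) (hj := hlt)).mp (by rw [hja, this])
    omega
  · intro h
    exact List.mem_take_iff_getElem.mpr ⟨order.idxOf a, by omega, List.getElem_idxOf hlt⟩

theorem idxOf_getElem_self (order : List Int) (hnd : order.Nodup) (i : Nat) (hi : i < order.length) :
    order.idxOf order[i] = i := by
  have hm : order[i] ∈ order := List.getElem_mem hi
  have hlt : order.idxOf order[i] < order.length := List.idxOf_lt_length_iff.mpr hm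
  exact (hnd.getElem_inj_iff (hi := hlt) (hj := hi)).mp (List.getElem_idxOf hlt)

theorem predA_iff (order : List Int) (hnd : order.Nodup) (i : Nat) (hi : i < order.length)
    (b : Int × Int) (h1 : b.1 ∈ order) (h2 : b.2 ∈ order) :
    ((order[i] = b.1 ∨ order[i] = b.2) ∧ b.1 ∉ order.take i ∧ b.2 ∉ order.take i)
      ↔ pvOwnerOf order b = order[i] := by
  have e1 := mem_take_iff_idxOf_lt order hnd b.1 h1 i
  have e2 := mem_take_iff_idxOf_lt order hnd b.2 h2 i
  have hidx : order.idxOf order[i] = i := idxOf_getElem_self order hnd i hi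
  have hl1 : order.idxOf b.1 < order.length := List.idxOf_lt_length_iff.mpr h1
  have hl2 : order.idxOf b.2 < order.length := List.idxOf_lt_length_iff.mpr h2
  unfold pvOwnerOf
  constructor
  · rintro ⟨hatom, hn1, hn2⟩
    have g1 : i ≤ order.idxOf b.1 := by by_contra hc; exact hn1 (e1.mpr (by omega))
    have g2 : i ≤ order.idxOf b.2 := by by_contra hc; exact hn2 (e2.mpr (by omega))
    split_ifs with hle
    · rcases hatom with h | h
      · exact h.symm
      · have hb2 : order.idxOf b.2 = i := by rw [← h, hidx]
        have hb1 : order.idxOf b.1 = i := by omega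
        have heq : order.idxOf b.1 = order.idxOf order[i] := by rw [hb1, hidx]
        exact (List.idxOf_inj h1).mp heq
    · rcases hatom with h | h
      · have hb1 : order.idxOf b.1 = i := by rw [← h, hidx]
        omega
      · exact h.symm
  · intro howner
    split_ifs at howner with hle
    · have hb1 : order.idxOf b.1 = i := by rw [howner, hidx]
      refine ⟨Or.inl howner.symm, ?_, ?_⟩
      · intro hm; rw [e1] at hm; omega
      · intro hm; rw [e2] at hm; omega
    · have hb2 : order.idxOf b.2 = i := by rw [howner, hidx]
      refine ⟨Or.inr howner.symm, ?_, ?_⟩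
      · intro hm; rw [e1] at hm; omega
      · intro hm; rw [e2] at hm; omega

theorem pickA_eq_find (order : List Int) (hnd : order.Nodup) (i : Nat) (hi : i < order.length)
    (bonds : List (Int × Int)) (hb : ∀ b ∈ bonds, b.1 ∈ order ∧ b.2 ∈ order) :
    pvPickA bonds (order.take i) order[i]
      = (bonds.find? (fun b => pvOwnerOf order b == order[i])).map (pvOrient order) := by
  induction bonds with
  | nil => rfl
  | cons b rest ih =>
    obtain ⟨h1, h2⟩ := hb b List.mem_cons_self
    have hiff := predA_iff order hnd i hi b h1 h2
    rw [pvPickA]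
    by_cases hp : (order[i] = b.1 ∨ order[i] = b.2) ∧ b.1 ∉ order.take i ∧ b.2 ∉ order.take i
    · have how : pvOwnerOf order b = order[i] := hiff.mp hp
      rw [if_pos hp, List.find?_cons_of_pos (by simp [how])]
      simp [pvOrient, how]
    · rw [if_neg hp, List.find?_cons_of_neg (by simp; intro hc; exact hp (hiff.mpr hc))]
      exact ih (fun b' hb' => hb b' (List.mem_cons_of_mem _ hb'))

theorem ownerDict_get (order : List Int) (hnd : order.Nodup) (bonds : List (Int × Int))
    (hb : ∀ b ∈ bonds, b.1 ∈ order ∧ b.2 ∈ order) (d : PySem.Dict Int (Int × Int)) (atom : Int) :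
    (bonds.foldl (pvStepB (pvRank order)) d).get? atom
      = (d.get? atom).or ((bonds.find? (fun b => pvOwnerOf order b == atom)).map (pvOrient order)) := by
  induction bonds generalizing d with
  | nil => simp
  | cons b rest ih =>
    obtain ⟨h1, h2⟩ := hb b List.mem_cons_self
    have hrest := fun b' hb' => hb b' (List.mem_cons_of_mem _ hb')
    have hown : (if (pvRank order).getD b.1 0 ≤ (pvRank order).getD b.2 0 then b.1 else b.2)
        = pvOwnerOf order b := by
      rw [rank_getD order hnd b.1 h1, rank_getD order hnd b.2 h2]
      unfold pvOwnerOf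
      simp [Nat.cast_le]
    have hstep : pvStepB (pvRank order) d b
        = if d.contains (pvOwnerOf order b) then d
          else d.insert (pvOwnerOf order b) (pvOrient order b) := by
      unfold pvStepB pvOrient
      rw [hown]
    rw [List.foldl_cons, hstep]
    by_cases hc : d.contains (pvOwnerOf order b) = true
    · rw [if_pos hc, ih hrest d]
      by_cases hpred : pvOwnerOf order b = atom
      · have hsome : (d.get? atom).isSome := by
          rw [← PySem.Dict.contains_eq_isSome_get?, ← hpred]; exact hc
        obtain ⟨v, hv⟩ := Option.isSome_iff_exists.mp hsome
        rw [List.find?_cons_of_pos (by simp [hpred]), hv, Option.some_or, Option.some_or]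
      · rw [List.find?_cons_of_neg (by simp [hpred])]
    · rw [if_neg hc, ih hrest _]
      by_cases hpred : pvOwnerOf order b = atom
      · have hnone : d.get? atom = none := by
          rw [PySem.Dict.get?_eq_none_iff_contains, ← hpred]
          exact Bool.eq_false_iff.mpr hc
        rw [List.find?_cons_of_pos (by simp [hpred]), hnone, Option.none_or]
        rw [hpred, PySem.Dict.get?_insert_self, Option.some_or]
        simp
      · rw [List.find?_cons_of_neg (by simp [hpred]),
          PySem.Dict.get?_insert_of_ne _ _ (fun h => hpred h.symm)]

theorem loopA_eq (bonds : List (Int × Int)) (order : List Int) (hnd : order.Nodup)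
    (hb : ∀ b ∈ bonds, b.1 ∈ order ∧ b.2 ∈ order) :
    ∀ (rest pre : List Int), pre ++ rest = order →
      pvLoopA bonds pre rest
        = rest.filterMap (fun atom => (pvOwnerDict bonds (pvRank order)).get? atom) := by
  intro rest
  induction rest with
  | nil => intro pre _; rfl
  | cons atom rest' ih =>
    intro pre h
    subst h
    have hi : pre.length < (pre ++ atom :: rest').length := by simp
    have hget : (pre ++ atom :: rest')[pre.length]'hi = atom := by simp
    have htake : (pre ++ atom :: rest').take pre.length = pre := List.take_left
    have hpick : pvPickA bonds pre atom
        = (pvOwnerDict bonds (pvRank (pre ++ atom :: rest'))).get? atom := by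
      have h1 := pickA_eq_find (pre ++ atom :: rest') hnd pre.length hi bonds hb
      rw [htake, hget] at h1
      rw [h1]
      unfold pvOwnerDict
      rw [ownerDict_get (pre ++ atom :: rest') hnd bonds hb, PySem.Dict.get?_empty, Option.none_or]
    have hrec := ih (pre ++ [atom]) (by simp)
    rw [pvLoopA, hpick]
    cases hv : (pvOwnerDict bonds (pvRank (pre ++ atom :: rest'))).get? atom with
    | none => simp [hv, hrec]
    | some c => simp [hv, hrec]

theorem main_lemma (bonds : List (Int × Int)) :
    pvLoopA bonds [] (pvAtomOrder bonds)
      = (pvAtomOrder bonds).filterMap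
          (fun atom => (pvOwnerDict bonds (pvRank (pvAtomOrder bonds))).get? atom) :=
  loopA_eq bonds (pvAtomOrder bonds) (order_nodup bonds)
    (fun b hb => endpoints_mem bonds b hb) (pvAtomOrder bonds) [] rfl

-- ===== VERDICT (by name: the statement is the Claim_ definition above) =====
theorem get_r_constraints_spec : Claim_equal_get_r_constraints := by
  intro ebb efb _
  unfold Spec_get_r_constraints get_r_constraints get_r_constraints_alt
  simpa using main_lemma (ebb ++ efb)
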